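-- pv_equiv track=rewrite | github.com/g-s01/data-programming-btp | gautam-results-and-analysis/raw-to-fine-direct/through-lfs/context-window-one/lfs_for_raw_sentence_gpt.py | label_sentence_Group_AerospaceManufacturer
-- ===== SOURCE A (Python) =====
-- ABSTAIN = -1
--
-- Group_AeroSpaceManufacturer = 30
--
-- def label_sentence_Group_AerospaceManufacturer(tokens):
--     """
--     Labels each token in a sentence as Group_AerospaceManufacturer if it indicates an aerospace manufacturing company or group.
--     Returns ABSTAIN for tokens that do not match the category.
--
--     Args:
--     tokens: list of str - A list of words representing a sentence.
--
--     Returns: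
--     list of str - A list of labels for each token.
--     """
--     # Common aerospace manufacturer indicators
--     aerospace_indicators = {
--         'boeing', 'airbus', 'lockheed', 'martin', 'northrop', 'grumman', 'raytheon', 'general',
--         'dynamics', 'north', 'american', 'aviation', 'united', 'helicopters', 'british', 'aerospace',
--         'siemens', 'halske', 'nakajima', 'hitachi', 's.e.saunders', 'cowes'
--     }
--     product_context = {
--         'aerospace', 'aircraft', 'helicopter', 'plane', 'jet', 'manufactured', 'produced', 'engine',
--         'works', 'designed', 'built', 'technology', 'group', 'company', 'corporation', 'engineer',
--         'pilot', 'test', 'system', 'signals'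
--     }
--
--     labels = []
--
--     for i, token in enumerate(tokens):
--         token_lower = token.lower()
--
--         # Check if the token or surrounding tokens suggest an aerospace manufacturer
--         if (
--             token_lower in aerospace_indicators and (  # The token itself indicates an aerospace manufacturer
--             (i > 0 and tokens[i - 1].lower() in aerospace_indicators) or  # Preceded by an aerospace manufacturer indicator
--             (i < len(tokens) - 1 and tokens[i + 1].lower() in aerospace_indicators) or  # Followed by an aerospace manufacturer indicator
--             (i > 0 and tokens[i - 1].lower() in product_context) or  # Preceded by a product context keyword
--             (i < len(tokens) - 1 and tokens[i + 1].lower() in product_context))  # Followed by a product context keyword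
--         ):
--             labels.append(Group_AeroSpaceManufacturer)
--         else:
--             labels.append(ABSTAIN)  # Default to 'O' if no match is found
--
--     return labels
-- ===== SOURCE B (Python) =====
-- ABSTAIN = -1
-- Group_AeroSpaceManufacturer = 30
--
-- _AERO = {
--     'boeing', 'airbus', 'lockheed', 'martin', 'northrop', 'grumman', 'raytheon', 'general',
--     'dynamics', 'north', 'american', 'aviation', 'united', 'helicopters', 'british', 'aerospace',
--     'siemens', 'halske', 'nakajima', 'hitachi', 's.e.saunders', 'cowes'
-- }
-- _CTX = {
--     'aerospace', 'aircraft', 'helicopter', 'plane', 'jet', 'manufactured', 'produced', 'engine',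
--     'works', 'designed', 'built', 'technology', 'group', 'company', 'corporation', 'engineer',
--     'pilot', 'test', 'system', 'signals'
-- }
-- _REL = _AERO | _CTX
--
-- def label_sentence_Group_AerospaceManufacturer(tokens):
--     # Mark-propagation: scan adjacent pairs once; each pair marks whichever of its
--     # two positions holds an indicator next to a relevant word. Then emit labels.
--     marked = set()
--     for i, (a, b) in enumerate(zip(tokens, tokens[1:])):
--         a, b = a.lower(), b.lower()
--         if a in _AERO and b in _REL:
--             marked.add(i)
--         if b in _AERO and a in _REL:
--             marked.add(i + 1)
--     return [Group_AeroSpaceManufacturer if i in marked else ABSTAIN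
--             for i in range(len(tokens))]
-- ===== Notes on version B (the rewrite author's own statement) =====
-- stated objective: alternative
-- what changed: Replaces A's per-token test that probes both neighbours under boundary guards with a mark-propagation algorithm: a single scan over adjacent token pairs adds index positions to a marked set (a pair marks whichever side holds an indicator next to a relevant word), then a second pass emits 30 for marked indices and -1 otherwise.
import Mathlib
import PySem

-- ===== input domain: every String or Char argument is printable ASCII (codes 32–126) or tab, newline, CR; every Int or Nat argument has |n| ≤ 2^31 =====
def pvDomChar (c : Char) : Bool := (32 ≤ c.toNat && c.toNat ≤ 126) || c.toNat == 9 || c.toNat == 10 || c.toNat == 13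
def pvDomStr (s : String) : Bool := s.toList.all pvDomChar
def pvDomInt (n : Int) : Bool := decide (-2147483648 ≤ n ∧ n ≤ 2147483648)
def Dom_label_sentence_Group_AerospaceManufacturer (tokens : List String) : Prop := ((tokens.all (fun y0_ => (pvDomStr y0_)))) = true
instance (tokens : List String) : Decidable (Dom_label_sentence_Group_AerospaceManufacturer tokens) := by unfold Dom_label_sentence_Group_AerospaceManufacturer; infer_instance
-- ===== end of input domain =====

-- B computes the same labels by a different algorithm: one scan over adjacent token pairs
-- marks index positions into a set, then a second pass emits labels from the marked set,
-- instead of A's per-token test probing both neighbours with boundary guards.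
-- ===== PORT A =====
def aeroIndicatorsA : List String :=
  ["boeing", "airbus", "lockheed", "martin", "northrop", "grumman", "raytheon", "general",
   "dynamics", "north", "american", "aviation", "united", "helicopters", "british", "aerospace",
   "siemens", "halske", "nakajima", "hitachi", "s.e.saunders", "cowes"]

def productContextA : List String :=
  ["aerospace", "aircraft", "helicopter", "plane", "jet", "manufactured", "produced", "engine",
   "works", "designed", "built", "technology", "group", "company", "corporation", "engineer",
   "pilot", "test", "system", "signals"]

-- tokens[i-1] / tokens[i+1] are only read under the i>0 / i<len-1 guards, so pyGetD with a dummy default is exact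
def label_sentence_Group_AerospaceManufacturer (tokens : List String) : List Int :=
  (PySem.List.enumerate tokens 0).map (fun p =>
    let i : Int := p.1
    let tl := PySem.Str.lower p.2
    if aeroIndicatorsA.contains tl ∧
        ((i > 0 ∧ aeroIndicatorsA.contains (PySem.Str.lower (PySem.List.pyGetD tokens (i - 1) ""))) ∨
         (i < (tokens.length : Int) - 1 ∧ aeroIndicatorsA.contains (PySem.Str.lower (PySem.List.pyGetD tokens (i + 1) ""))) ∨
         (i > 0 ∧ productContextA.contains (PySem.Str.lower (PySem.List.pyGetD tokens (i - 1) ""))) ∨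
         (i < (tokens.length : Int) - 1 ∧ productContextA.contains (PySem.Str.lower (PySem.List.pyGetD tokens (i + 1) ""))))
    then 30 else -1)

-- ===== PORT B =====
-- _REL = _AERO | _CTX: membership in the union = membership in the concatenation
def relB : List String := aeroIndicatorsA ++ productContextA

-- the body of Source B's pair loop: mark p.1 and/or p.1 + 1 in the set
def stepB (s : PySem.Set Int) (p : Int × String × String) : PySem.Set Int :=
  let a := PySem.Str.lower p.2.1
  let b := PySem.Str.lower p.2.2
  let s1 := if aeroIndicatorsA.contains a && relB.contains b then PySem.Set.add s p.1 else s
  if aeroIndicatorsA.contains b && relB.contains a then PySem.Set.add s1 (p.1 + 1) else s1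

-- marked = the set built by the pair scan (zip(tokens, tokens[1:]) = zip with drop 1)
def markedOf (tokens : List String) : PySem.Set Int :=
  (PySem.List.enumerate (tokens.zip (tokens.drop 1)) 0).foldl stepB PySem.Set.empty

def label_sentence_Group_AerospaceManufacturer_alt (tokens : List String) : List Int :=
  let marked := markedOf tokens
  (PySem.List.pyRange 0 (tokens.length : Int) 1).map
    (fun i => if marked.contains i then 30 else -1)

-- ===== PRECONDITION & SPEC =====
def Spec_label_sentence_Group_AerospaceManufacturer (tokens : List String) (out : List Int) : Prop := out = label_sentence_Group_AerospaceManufacturer_alt tokens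
instance (tokens : List String) (out : List Int) : Decidable (Spec_label_sentence_Group_AerospaceManufacturer tokens out) := by unfold Spec_label_sentence_Group_AerospaceManufacturer; infer_instance

-- ===== CLAIM (what is proved, stated in full; the proofs are below) =====
def Claim_equal_label_sentence_Group_AerospaceManufacturer : Prop := ∀ (tokens : List String), Dom_label_sentence_Group_AerospaceManufacturer tokens → Spec_label_sentence_Group_AerospaceManufacturer tokens (label_sentence_Group_AerospaceManufacturer tokens)

-- ===== LEMMAS AND PROOFS =====

theorem lenA (tokens : List String) : (label_sentence_Group_AerospaceManufacturer tokens).length = tokens.length := by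
  simp [label_sentence_Group_AerospaceManufacturer]

theorem lenB (tokens : List String) : (label_sentence_Group_AerospaceManufacturer_alt tokens).length = tokens.length := by
  simp [label_sentence_Group_AerospaceManufacturer_alt, PySem.List.length_pyRange_one]

theorem relB_contains (t : String) : relB.contains t = (aeroIndicatorsA.contains t || productContextA.contains t) := by
  simp [relB]

-- what ends up in the set after folding stepB over any pair list
set_option maxHeartbeats 1000000 in
theorem mem_foldl_stepB (L : List (Int × String × String)) (s : PySem.Set Int) (m : Int) :
    m ∈ L.foldl stepB s ↔ m ∈ s ∨ ∃ p ∈ L,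
      ((aeroIndicatorsA.contains (PySem.Str.lower p.2.1) && relB.contains (PySem.Str.lower p.2.2)) = true ∧ m = p.1) ∨
      ((aeroIndicatorsA.contains (PySem.Str.lower p.2.2) && relB.contains (PySem.Str.lower p.2.1)) = true ∧ m = p.1 + 1) := by
  induction L generalizing s with
  | nil => simp
  | cons q L ih =>
    simp only [List.foldl_cons, ih, List.mem_cons, or_and_right, exists_or, exists_eq_left]
    simp only [stepB]
    split_ifs with h1 h2 h2
    all_goals try simp only [PySem.Set.mem_add]
    all_goals simp only [h1, h2, true_and, Bool.false_eq_true, false_and, false_or, or_false, or_assoc]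

theorem mem_marked (tokens : List String) (m : Int) :
    m ∈ markedOf tokens ↔ ∃ j : Nat, j + 1 < tokens.length ∧
      (((aeroIndicatorsA.contains (PySem.Str.lower (PySem.List.pyGetD tokens (j : Int) "")) &&
         relB.contains (PySem.Str.lower (PySem.List.pyGetD tokens ((j : Int) + 1) ""))) = true ∧ m = (j : Int)) ∨
       ((aeroIndicatorsA.contains (PySem.Str.lower (PySem.List.pyGetD tokens ((j : Int) + 1) "")) &&
         relB.contains (PySem.Str.lower (PySem.List.pyGetD tokens (j : Int) ""))) = true ∧ m = (j : Int) + 1)) := by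
  unfold markedOf
  rw [mem_foldl_stepB]
  simp only [PySem.Set.empty, List.not_mem_nil, false_or]
  constructor
  · rintro ⟨p, hp, hcond⟩
    rw [PySem.List.mem_enumerate_iff] at hp
    obtain ⟨k, hk, rfl⟩ := hp
    have hk' : k + 1 < tokens.length := by
      simp [List.length_zip] at hk; omega
    refine ⟨k, hk', ?_⟩
    have hz : (tokens.zip (tokens.drop 1))[k] = (tokens[k]'(by omega), tokens[k+1]'hk') := by
      simp [List.getElem_zip]
    have e1 : PySem.List.pyGetD tokens (k : Int) "" = tokens[k]'(by omega) := by
      rw [PySem.List.pyGetD_natCast, List.getD_eq_getElem]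
    have e2 : PySem.List.pyGetD tokens ((k : Int) + 1) "" = tokens[k+1]'hk' := by
      have : ((k : Int) + 1) = ((k + 1 : Nat) : Int) := by omega
      rw [this, PySem.List.pyGetD_natCast, List.getD_eq_getElem]
    rw [hz] at hcond
    simpa [e1, e2, zero_add] using hcond
  · rintro ⟨j, hj, hcond⟩
    have hjz : j < (tokens.zip (tokens.drop 1)).length := by
      simp [List.length_zip]; omega
    refine ⟨(0 + (j : Int), (tokens.zip (tokens.drop 1))[j]), ?_, ?_⟩
    · rw [PySem.List.mem_enumerate_iff]
      exact ⟨j, hjz, rfl⟩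
    · have hz : (tokens.zip (tokens.drop 1))[j] = (tokens[j]'(by omega), tokens[j+1]'(by omega)) := by
        simp [List.getElem_zip]
      have e1 : PySem.List.pyGetD tokens (j : Int) "" = tokens[j]'(by omega) := by
        rw [PySem.List.pyGetD_natCast, List.getD_eq_getElem]
      have e2 : PySem.List.pyGetD tokens ((j : Int) + 1) "" = tokens[j+1]'(by omega) := by
        have : ((j : Int) + 1) = ((j + 1 : Nat) : Int) := by omega
        rw [this, PySem.List.pyGetD_natCast, List.getD_eq_getElem]
      rw [hz]
      simpa [e1, e2, zero_add] using hcond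

theorem entry_eq (tokens : List String) (i : Nat)
    (h1 : i < (label_sentence_Group_AerospaceManufacturer tokens).length)
    (h2 : i < (label_sentence_Group_AerospaceManufacturer_alt tokens).length) :
    (label_sentence_Group_AerospaceManufacturer tokens)[i] = (label_sentence_Group_AerospaceManufacturer_alt tokens)[i] := by
  have hn : i < tokens.length := by rw [lenA] at h1; exact h1
  simp only [label_sentence_Group_AerospaceManufacturer,
             label_sentence_Group_AerospaceManufacturer_alt,
             List.getElem_map, PySem.List.getElem_enumerate, zero_add,
             PySem.List.getElem_pyRange_one]
  refine if_congr ?_ rfl rfl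
  have hcm : (markedOf tokens).contains (i : Int) = true ↔ (i : Int) ∈ markedOf tokens := by
    simp [PySem.Set.contains]
  rw [hcm, mem_marked]
  constructor
  · rintro ⟨ha, h⟩
    have e0 : PySem.List.pyGetD tokens (i : Int) "" = tokens[i] := by
      rw [PySem.List.pyGetD_natCast, List.getD_eq_getElem]
    rcases h with ⟨hg, hc⟩ | ⟨hg, hc⟩ | ⟨hg, hc⟩ | ⟨hg, hc⟩
    · -- left neighbour, aero: pair j = i - 1
      refine ⟨i - 1, by omega, Or.inr ⟨?_, by omega⟩⟩
      have e2 : ((i - 1 : Nat) : Int) + 1 = (i : Int) := by omega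
      have e1 : ((i - 1 : Nat) : Int) = (i : Int) - 1 := by omega
      rw [e2, e0, e1, relB_contains]
      simp only [Bool.and_eq_true, Bool.or_eq_true]
      exact ⟨ha, Or.inl hc⟩
    · -- right neighbour, aero: pair j = i
      refine ⟨i, by omega, Or.inl ⟨?_, rfl⟩⟩
      rw [e0, relB_contains]
      simp only [Bool.and_eq_true, Bool.or_eq_true]
      exact ⟨ha, Or.inl hc⟩
    · refine ⟨i - 1, by omega, Or.inr ⟨?_, by omega⟩⟩
      have e2 : ((i - 1 : Nat) : Int) + 1 = (i : Int) := by omega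
      have e1 : ((i - 1 : Nat) : Int) = (i : Int) - 1 := by omega
      rw [e2, e0, e1, relB_contains]
      simp only [Bool.and_eq_true, Bool.or_eq_true]
      exact ⟨ha, Or.inr hc⟩
    · refine ⟨i, by omega, Or.inl ⟨?_, rfl⟩⟩
      rw [e0, relB_contains]
      simp only [Bool.and_eq_true, Bool.or_eq_true]
      exact ⟨ha, Or.inr hc⟩
  · rintro ⟨j, hj, ⟨hc, hm⟩ | ⟨hc, hm⟩⟩
    · -- m = j : this token is the left of the pair, neighbour is j+1 = i+1
      have hji : j = i := by omega
      subst hji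
      rw [relB_contains] at hc
      simp only [Bool.and_eq_true, Bool.or_eq_true] at hc
      obtain ⟨ha, hr⟩ := hc
      have e0 : PySem.List.pyGetD tokens (j : Int) "" = tokens[j] := by
        rw [PySem.List.pyGetD_natCast, List.getD_eq_getElem]
      rw [e0] at ha
      refine ⟨ha, ?_⟩
      rcases hr with hr | hr
      · exact Or.inr (Or.inl ⟨by omega, hr⟩)
      · exact Or.inr (Or.inr (Or.inr ⟨by omega, hr⟩))
    · -- m = j + 1 : this token is the right of the pair, neighbour is j = i-1
      have hji : i = j + 1 := by omega
      rw [relB_contains] at hc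
      simp only [Bool.and_eq_true, Bool.or_eq_true] at hc
      obtain ⟨ha, hr⟩ := hc
      have e0 : PySem.List.pyGetD tokens ((j : Int) + 1) "" = tokens[i] := by
        have : ((j : Int) + 1) = ((i : Nat) : Int) := by omega
        rw [this, PySem.List.pyGetD_natCast, List.getD_eq_getElem]
      have e1 : (j : Int) = (i : Int) - 1 := by omega
      rw [e0] at ha
      rw [e1] at hr
      refine ⟨ha, ?_⟩
      rcases hr with hr | hr
      · exact Or.inl ⟨by omega, hr⟩
      · exact Or.inr (Or.inr (Or.inl ⟨by omega, hr⟩))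

-- ===== VERDICT (by name: the statement is the Claim_ definition above) =====
theorem label_sentence_Group_AerospaceManufacturer_spec : Claim_equal_label_sentence_Group_AerospaceManufacturer := by
  intro tokens _
  unfold Spec_label_sentence_Group_AerospaceManufacturer
  exact List.ext_getElem (by rw [lenA, lenB]) (entry_eq tokens)
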